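-- pv_equiv track=rewrite | github.com/DNKonanov/Genome-Complexity-Browser | gcb_server/source/find_context.py | find_context
-- ===== SOURCE A (Python) =====
-- def find_context(graph):
--
--     og_set = set([])
--     edge_og = set([])
--     for name in graph:
--         for contig in graph[name]:
--             c = graph[name][contig]
--
--
--             edge_og.add(c[0])
--             edge_og.add(c[-1])
--             for og in c:
--                 og_set.add(og)
--
--     og_set.difference_update(edge_og)
--
--     og_context = {og: [] for og in og_set}
--
--     for name in graph:
--         for contig in graph[name]:
--             c = graph[name][contig]
--
--             for i in range(1, len(c) - 1):
--                 if c[i] not in og_context: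
--                     continue
--
--                 if ((c[i-1], c[i+1]) in og_context[c[i]] or (c[i+1], c[i-1]) in og_context[c[i]]):
--                     pass
--                 else:
--                     og_context[c[i]].append((c[i-1], c[i+1]))
--
--     return {og: len(og_context[og]) for og in og_context}
-- ===== SOURCE B (Python) =====
-- def find_context(graph):
--     # single traversal: collect endpoint ogs and, per interior og, the set of
--     # normalized (unordered) neighbor pairs; filter endpoints at the end
--     edge_og = set()
--     contexts = {}
--     for name in graph:
--         for contig in graph[name]:
--             c = graph[name][contig]
--             edge_og.add(c[0])
--             edge_og.add(c[-1])
--             for i in range(1, len(c) - 1):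
--                 a, b = c[i - 1], c[i + 1]
--                 key = (a, b) if a <= b else (b, a)
--                 contexts.setdefault(c[i], set()).add(key)
--     return {og: len(pairs) for og, pairs in contexts.items() if og not in edge_og}
-- ===== Notes on version B (the rewrite author's own statement) =====
-- stated objective: simpler
-- what changed: Replaces A's two full traversals (first collect all ogs minus endpoints, build a list-valued dict, then scan again appending unseen pairs with a two-way membership test) by one traversal that records endpoint ogs and, per interior og, a set of normalized unordered neighbor pairs, filtering endpoints only at the end.
import Mathlib
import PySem

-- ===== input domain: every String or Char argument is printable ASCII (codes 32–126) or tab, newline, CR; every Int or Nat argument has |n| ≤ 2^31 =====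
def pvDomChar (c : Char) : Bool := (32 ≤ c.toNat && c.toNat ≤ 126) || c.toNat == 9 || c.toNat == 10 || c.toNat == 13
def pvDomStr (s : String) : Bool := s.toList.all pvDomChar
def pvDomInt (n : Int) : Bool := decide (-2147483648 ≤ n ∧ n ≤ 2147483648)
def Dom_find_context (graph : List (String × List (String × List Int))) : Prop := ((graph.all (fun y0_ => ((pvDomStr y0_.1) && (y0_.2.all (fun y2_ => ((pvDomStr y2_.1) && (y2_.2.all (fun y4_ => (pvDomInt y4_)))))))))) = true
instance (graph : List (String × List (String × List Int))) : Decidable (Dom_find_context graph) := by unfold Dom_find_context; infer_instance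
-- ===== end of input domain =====

-- B replaces A's two traversals by one traversal collecting endpoint ogs and per-interior-og
-- a set of normalized unordered neighbor pairs, filtering endpoints at the end (objective: simpler).

-- ===== PORT A =====
def find_context (graph : List (String × List (String × List Int))) : List (Int × Int) :=
  -- first pass: og_set and edge_og
  let st := graph.foldl (fun st nv =>
      nv.2.foldl (fun (st : PySem.Set Int × PySem.Set Int) cv =>
        let c := cv.2
        (c.foldl (fun s og => PySem.Set.add s og) st.1,
         PySem.Set.add (PySem.Set.add st.2 (PySem.List.pyGetD c 0 0)) (PySem.List.pyGetD c (-1) 0))) st)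
    (PySem.Set.empty, PySem.Set.empty)
  let og_set := PySem.Set.diff st.1 st.2
  let og_context0 : PySem.Dict Int (List (Int × Int)) :=
    og_set.foldl (fun d og => d.insert og []) PySem.Dict.empty
  -- second pass
  let og_context := graph.foldl (fun d nv =>
      nv.2.foldl (fun (d : PySem.Dict Int (List (Int × Int))) cv =>
        let c := cv.2
        (PySem.List.pyRange 1 ((c.length : Int) - 1)).foldl (fun d i =>
          let ci := PySem.List.pyGetD c i 0
          if d.contains ci then
            let prev := PySem.List.pyGetD c (i - 1) 0
            let next := PySem.List.pyGetD c (i + 1) 0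
            let lst := d.getD ci []
            if (prev, next) ∈ lst ∨ (next, prev) ∈ lst then d
            else d.insert ci (lst ++ [(prev, next)])
          else d) d) d) og_context0
  og_context.items.map (fun p => (p.1, (p.2.length : Int)))

-- ===== PORT B =====
def find_context_alt (graph : List (String × List (String × List Int))) : List (Int × Int) :=
  let st := graph.foldl (fun st nv =>
      nv.2.foldl (fun (st : PySem.Set Int × PySem.Dict Int (PySem.Set (Int × Int))) cv =>
        let c := cv.2
        (PySem.Set.add (PySem.Set.add st.1 (PySem.List.pyGetD c 0 0)) (PySem.List.pyGetD c (-1) 0),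
         (PySem.List.pyRange 1 ((c.length : Int) - 1)).foldl (fun d i =>
            let a := PySem.List.pyGetD c (i - 1) 0
            let b := PySem.List.pyGetD c (i + 1) 0
            let key := if a ≤ b then (a, b) else (b, a)
            d.modify (PySem.List.pyGetD c i 0) PySem.Set.empty (fun s => PySem.Set.add s key)) st.2)) st)
    (PySem.Set.empty, PySem.Dict.empty)
  (st.2.items.filter (fun p => !(PySem.Set.contains st.1 p.1))).map
    (fun p => (p.1, PySem.Set.len p.2))

-- ===== PRECONDITION & SPEC =====
-- Pre_ excludes exactly the inputs where A raises IndexError: a contig that is the empty list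
-- (A evaluates c[0] and c[-1]); B raises there too.
def Pre_find_context (graph : List (String × List (String × List Int))) : Prop :=
  ∀ p ∈ graph, ∀ q ∈ p.2, q.2 ≠ []
instance (graph : List (String × List (String × List Int))) : Decidable (Pre_find_context graph) := by unfold Pre_find_context; infer_instance
def pvWitness_find_context : (List (String × List (String × List Int))) :=
  [("g", [("c1", [1, 2, 3, 2, 4]), ("c2", [5, 2, 3])])]
def Spec_find_context (graph : List (String × List (String × List Int))) (out : List (Int × Int)) : Prop := out = find_context_alt graph
instance (graph : List (String × List (String × List Int))) (out : List (Int × Int)) : Decidable (Spec_find_context graph out) := by unfold Spec_find_context; infer_instance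

-- ===== CLAIM (what is proved, stated in full; the proofs are below) =====
def Claim_equal_find_context : Prop := ∀ (graph : List (String × List (String × List Int))), Dom_find_context graph → Pre_find_context graph → Spec_find_context graph (find_context graph)

-- ===== LEMMAS AND PROOFS =====

-- the contig lists, in traversal order
def pvContigs (graph : List (String × List (String × List Int))) : List (List Int) :=
  graph.flatMap (fun nv => nv.2.map Prod.snd)

-- the (prev, mid, next) triples a contig's interior loop visits
def pvTrip (c : List Int) : List (Int × Int × Int) :=
  (PySem.List.pyRange 1 ((c.length : Int) - 1)).map
    (fun i => (PySem.List.pyGetD c (i - 1) 0, PySem.List.pyGetD c i 0, PySem.List.pyGetD c (i + 1) 0))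

def pvNorm (q : Int × Int) : Int × Int := if q.1 ≤ q.2 then q else (q.2, q.1)

def pvStepA (d : PySem.Dict Int (List (Int × Int))) (t : Int × Int × Int) : PySem.Dict Int (List (Int × Int)) :=
  if d.contains t.2.1 then
    if (t.1, t.2.2) ∈ d.getD t.2.1 [] ∨ (t.2.2, t.1) ∈ d.getD t.2.1 [] then d
    else d.insert t.2.1 (d.getD t.2.1 [] ++ [(t.1, t.2.2)])
  else d

def pvStepB (d : PySem.Dict Int (PySem.Set (Int × Int))) (t : Int × Int × Int) : PySem.Dict Int (PySem.Set (Int × Int)) :=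
  d.modify t.2.1 PySem.Set.empty (fun s => PySem.Set.add s (pvNorm (t.1, t.2.2)))

def pvPairA (l : List (Int × Int)) (q : Int × Int) : List (Int × Int) :=
  if q ∈ l ∨ (q.2, q.1) ∈ l then l else l ++ [q]

-- nested dict loops = one fold over the flattened contig list
theorem pv_nested_foldl {s : Type} (graph : List (String × List (String × List Int)))
    (F : s → List Int → s) (init : s) :
    graph.foldl (fun st nv => nv.2.foldl (fun st cv => F st cv.2) st) init
      = (pvContigs graph).foldl F init := by
  rw [pvContigs, List.flatMap_def, List.foldl_flatten, List.foldl_map]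
  simp [List.foldl_map]

theorem pv_foldl_add_filter (p : Int → Bool) :
    ∀ (l : List Int) (s : List Int),
      (l.foldl PySem.Set.add s).filter p = (l.filter p).foldl PySem.Set.add (s.filter p) := by
  intro l
  induction l with
  | nil => intro s; simp
  | cons x t ih =>
    intro s
    simp only [List.foldl_cons, List.filter_cons]
    by_cases hp : p x = true
    · simp only [hp, if_pos, List.foldl_cons]
      rw [ih]
      congr 1
      by_cases hx : x ∈ s
      · have h1 : PySem.Set.add s x = s := by simp [PySem.Set.add, PySem.Set.contains, hx]
        have h2 : PySem.Set.add (s.filter p) x = s.filter p := by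
          simp [PySem.Set.add, PySem.Set.contains, List.mem_filter, hx, hp]
        rw [h1, h2]
      · have h1 : PySem.Set.add s x = s ++ [x] := by simp [PySem.Set.add, PySem.Set.contains, hx]
        have h2 : PySem.Set.add (s.filter p) x = s.filter p ++ [x] := by
          simp [PySem.Set.add, PySem.Set.contains, List.mem_filter, hx]
        rw [h1, h2, List.filter_append]
        simp [hp]
    · simp only [hp]
      rw [ih]
      simp only [Bool.false_eq_true, if_neg, not_false_iff]
      congr 1
      by_cases hx : x ∈ s
      · simp [PySem.Set.add, PySem.Set.contains, hx]
      · simp [PySem.Set.add, PySem.Set.contains, hx, List.filter_append, hp]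

theorem pv_edge_mono (cs : List (List Int)) (s : List Int) (x : Int) (hx : x ∈ s) :
    x ∈ cs.foldl (fun s c => PySem.Set.add (PySem.Set.add s (PySem.List.pyGetD c 0 0)) (PySem.List.pyGetD c (-1) 0)) s := by
  induction cs generalizing s with
  | nil => simpa
  | cons c t ih =>
    simp only [List.foldl_cons]
    exact ih _ (by simp [PySem.Set.mem_add, hx])

theorem pv_edge_mem (cs : List (List Int)) (s : List Int) (c : List Int) (hc : c ∈ cs) :
    PySem.List.pyGetD c 0 0 ∈ cs.foldl (fun s c => PySem.Set.add (PySem.Set.add s (PySem.List.pyGetD c 0 0)) (PySem.List.pyGetD c (-1) 0)) s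
    ∧ PySem.List.pyGetD c (-1) 0 ∈ cs.foldl (fun s c => PySem.Set.add (PySem.Set.add s (PySem.List.pyGetD c 0 0)) (PySem.List.pyGetD c (-1) 0)) s := by
  induction cs generalizing s with
  | nil => simp at hc
  | cons c0 t ih =>
    simp only [List.foldl_cons]
    rcases List.mem_cons.mp hc with h | h
    · subst h
      exact ⟨pv_edge_mono _ _ _ (by simp [PySem.Set.mem_add]),
             pv_edge_mono _ _ _ (by simp [PySem.Set.mem_add])⟩
    · exact ih _ h

theorem pv_map_pyGetD_range (xs : List Int) : ∀ (m : Nat), m ≤ xs.length →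
    (PySem.List.pyRange 1 (m : Int)).map (fun i => PySem.List.pyGetD xs i 0)
      = (xs.take m).drop 1 := by
  intro m
  induction m with
  | zero => intro _; simp [PySem.List.pyRange_one_eq_nil]
  | succ n ih =>
    intro h
    rcases Nat.eq_zero_or_pos n with hn | hn
    · subst hn
      have h1 : PySem.List.pyRange 1 ((1 : Nat) : Int) = [] := by
        apply PySem.List.pyRange_one_eq_nil; norm_num
      rw [h1]
      rcases xs with _ | ⟨a, t⟩ <;> simp
    · have hcast : ((n + 1 : Nat) : Int) = (n : Int) + 1 := by push_cast; ring
      rw [hcast, PySem.List.pyRange_one_succ_right (by exact_mod_cast hn), List.map_append]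
      rw [ih (by omega)]
      have hget : PySem.List.pyGetD xs (n : Int) 0 = xs[n]'(by omega) := by
        rw [PySem.List.pyGetD_eq_getElem xs 0 (by positivity) (by exact_mod_cast (by omega : n < xs.length))]
        simp
      have htake : xs.take (n + 1) = xs.take n ++ [xs[n]'(by omega)] := by
        rw [List.take_add_one]
        simp [List.getElem?_eq_getElem (by omega : n < xs.length)]
      rw [htake, List.drop_append_of_le_length (by simp; omega)]
      simp [hget]

theorem pv_mids (c : List Int) (hc : c ≠ []) :
    (pvTrip c).map (fun t => t.2.1) = (c.take (c.length - 1)).drop 1 := by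
  have hlen : 1 ≤ c.length := List.length_pos_iff.mpr hc
  have hcast : ((c.length - 1 : Nat) : Int) = (c.length : Int) - 1 := by omega
  rw [pvTrip, List.map_map, ← hcast, ← pv_map_pyGetD_range c (c.length - 1) (by omega)]
  rfl

theorem pv_filter_contig (pE : Int → Bool) (c : List Int) (hc : c ≠ [])
    (h1 : pE (PySem.List.pyGetD c 0 0) = false) (h2 : pE (PySem.List.pyGetD c (-1) 0) = false) :
    c.filter pE = ((c.take (c.length - 1)).drop 1).filter pE := by
  have hhd : PySem.List.pyGetD c 0 0 = c.head hc := by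
    cases c with
    | nil => simp at hc
    | cons a t => simp [PySem.List.pyGetD, PySem.List.pyGet?, PySem.List.pyIdx?]
  have hlst : PySem.List.pyGetD c (-1) 0 = c.getLast hc := by
    rw [PySem.List.pyGetD, PySem.List.pyGet?_neg_one, List.getLast?_eq_some_getLast hc]
    rfl
  rw [hhd] at h1; rw [hlst] at h2
  have hdrop : c.take (c.length - 1) = c.dropLast := by simp [List.dropLast_eq_take]
  rw [hdrop]
  conv_lhs => rw [← List.dropLast_concat_getLast hc]
  rw [List.filter_append]
  simp only [List.filter_cons, h2, List.filter_nil]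
  rcases hd : c.dropLast with _ | ⟨a, t⟩
  · simp
  · have hc2 := List.dropLast_concat_getLast hc
    rw [hd] at hc2
    have ha : pE a = false := by
      have hh : c.head? = some a := by
        have := congrArg List.head? hc2
        simpa using this.symm
      rwa [(List.head_eq_iff_head?_eq_some hc).mpr hh] at h1
    simp [ha]

theorem pv_keysA : ∀ (ts : List (Int × Int × Int)) (d : PySem.Dict Int (List (Int × Int))),
    (ts.foldl pvStepA d).keys = d.keys := by
  intro ts
  induction ts with
  | nil => intro d; rfl
  | cons t r ih =>
    intro d
    rw [List.foldl_cons, ih]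
    unfold pvStepA
    split_ifs with h1 h2
    · rfl
    · exact PySem.Dict.keys_insert_of_contains _ _ h1
    · rfl

theorem pv_getA : ∀ (ts : List (Int × Int × Int)) (d : PySem.Dict Int (List (Int × Int))) (k : Int),
    d.contains k = true →
    (ts.foldl pvStepA d).getD k []
      = (ts.filter (fun t => t.2.1 == k)).foldl (fun l t => pvPairA l (t.1, t.2.2)) (d.getD k []) := by
  intro ts
  induction ts with
  | nil => intro d k _; rfl
  | cons t r ih =>
    intro d k hk
    rw [List.foldl_cons, List.filter_cons]
    by_cases hm : t.2.1 = k
    · simp only [hm, beq_self_eq_true, if_pos, List.foldl_cons]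
      have hstep : (pvStepA d t).getD k [] = pvPairA (d.getD k []) (t.1, t.2.2) := by
        unfold pvStepA pvPairA
        rw [hm]
        simp only [hk, if_pos]
        split_ifs with h2
        · rfl
        · exact PySem.Dict.getD_insert_self ..
      have hcont : (pvStepA d t).contains k = true := by
        unfold pvStepA
        rw [hm]
        simp only [hk, if_pos]
        split_ifs with h2
        · exact hk
        · exact PySem.Dict.contains_insert_self ..
      rw [ih _ _ hcont, hstep]
    · have hbeq : (t.2.1 == k) = false := by simpa using hm
      simp only [hbeq, Bool.false_eq_true, if_neg, not_false_iff]
      have hg : (pvStepA d t).getD k [] = d.getD k [] := by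
        unfold pvStepA
        split_ifs with h1 h2
        · rfl
        · exact PySem.Dict.getD_insert_of_ne _ _ _ (fun h => hm h.symm)
        · rfl
      have hcont : (pvStepA d t).contains k = true := by
        unfold pvStepA
        split_ifs with h1 h2
        · exact hk
        · rw [PySem.Dict.contains_insert]; simp [hk]
        · exact hk
      rw [ih _ _ hcont, hg]

theorem pv_getB : ∀ (ts : List (Int × Int × Int)) (d : PySem.Dict Int (PySem.Set (Int × Int))) (k : Int),
    (ts.foldl pvStepB d).getD k PySem.Set.empty
      = (ts.filter (fun t => t.2.1 == k)).foldl
          (fun s t => PySem.Set.add s (pvNorm (t.1, t.2.2))) (d.getD k PySem.Set.empty) := by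
  intro ts
  induction ts with
  | nil => intro d k; rfl
  | cons t r ih =>
    intro d k
    rw [List.foldl_cons, List.filter_cons, ih]
    by_cases hm : t.2.1 = k
    · simp only [hm, beq_self_eq_true, if_pos, List.foldl_cons]
      congr 1
      unfold pvStepB
      rw [hm]
      exact PySem.Dict.getD_modify_self ..
    · have hbeq : (t.2.1 == k) = false := by simpa using hm
      simp only [hbeq, Bool.false_eq_true, if_neg, not_false_iff]
      congr 1
      unfold pvStepB
      exact PySem.Dict.getD_modify_of_ne _ _ _ (fun h => hm h.symm)

theorem pv_norm_eq_iff (p q : Int × Int) : pvNorm p = pvNorm q ↔ p = q ∨ p = (q.2, q.1) := by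
  obtain ⟨a, b⟩ := p
  obtain ⟨x, y⟩ := q
  simp only [pvNorm, Prod.mk.injEq]
  split_ifs <;> simp_all [Prod.mk.injEq] <;> omega

theorem pv_count : ∀ (qs : List (Int × Int)) (l : List (Int × Int)) (s : PySem.Set (Int × Int)),
    (∀ q : Int × Int, (q ∈ l ∨ (q.2, q.1) ∈ l) ↔ pvNorm q ∈ s) → l.length = s.length →
    (qs.foldl pvPairA l).length
      = (qs.foldl (fun s q => PySem.Set.add s (pvNorm q)) s).length := by
  intro qs
  induction qs with
  | nil => intro l s _ hlen; simpa using hlen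
  | cons q r ih =>
    intro l s hinv hlen
    rw [List.foldl_cons, List.foldl_cons]
    by_cases hq : q ∈ l ∨ (q.2, q.1) ∈ l
    · have hs : pvNorm q ∈ s := (hinv q).mp hq
      have h1 : pvPairA l q = l := by unfold pvPairA; simp [hq]
      have h2 : PySem.Set.add s (pvNorm q) = s := by
        simp [PySem.Set.add, PySem.Set.contains, hs]
      rw [h1, h2]
      exact ih _ _ hinv hlen
    · have hs : pvNorm q ∉ s := fun h => hq ((hinv q).mpr h)
      have h1 : pvPairA l q = l ++ [q] := by unfold pvPairA; simp [hq]
      have h2 : PySem.Set.add s (pvNorm q) = s ++ [pvNorm q] := by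
        simp [PySem.Set.add, PySem.Set.contains, hs]
      rw [h1, h2]
      apply ih
      · intro p
        constructor
        · rintro (hp | hp) <;> rcases List.mem_append.mp hp with h | h
          · exact List.mem_append.mpr (Or.inl ((hinv p).mp (Or.inl h)))
          · simp at h
            subst h
            simp
          · exact List.mem_append.mpr (Or.inl ((hinv p).mp (Or.inr h)))
          · simp at h
            have hpq : p = (q.2, q.1) := by
              obtain ⟨p1, p2⟩ := p; obtain ⟨q1, q2⟩ := q
              simp [Prod.mk.injEq] at h ⊢
              exact ⟨h.2, h.1⟩
            subst hpq
            have hnn : pvNorm ((q.2, q.1) : Int × Int) = pvNorm q := by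
              rw [pv_norm_eq_iff]; right; rfl
            rw [hnn]
            simp
        · intro hp
          rcases List.mem_append.mp hp with h | h
          · rcases (hinv p).mpr h with h1 | h1
            · exact Or.inl (List.mem_append.mpr (Or.inl h1))
            · exact Or.inr (List.mem_append.mpr (Or.inl h1))
          · simp at h
            rcases (pv_norm_eq_iff p q).mp h with h1 | h1
            · subst h1; exact Or.inl (by simp)
            · subst h1
              right
              simp
      · simp [hlen]

def pvOgs (graph : List (String × List (String × List Int))) : PySem.Set Int :=
  (pvContigs graph).foldl (fun s c => c.foldl (fun s og => PySem.Set.add s og) s) PySem.Set.empty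

def pvE (graph : List (String × List (String × List Int))) : PySem.Set Int :=
  (pvContigs graph).foldl (fun s c =>
    PySem.Set.add (PySem.Set.add s (PySem.List.pyGetD c 0 0)) (PySem.List.pyGetD c (-1) 0)) PySem.Set.empty

def pvT (graph : List (String × List (String × List Int))) : List (Int × Int × Int) :=
  (pvContigs graph).flatMap pvTrip

def pvKeyA (graph : List (String × List (String × List Int))) : List Int :=
  PySem.Set.diff (pvOgs graph) (pvE graph)

def pvKeyB (graph : List (String × List (String × List Int))) : List Int :=
  (PySem.Set.ofList ((pvT graph).map (fun t => t.2.1))).filter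
    (fun x => !(PySem.Set.contains (pvE graph) x))

def pvValA (graph : List (String × List (String × List Int))) (k : Int) : List (Int × Int) :=
  ((pvT graph).filter (fun t => t.2.1 == k)).foldl (fun l t => pvPairA l (t.1, t.2.2)) []

def pvValB (graph : List (String × List (String × List Int))) (k : Int) : PySem.Set (Int × Int) :=
  ((pvT graph).filter (fun t => t.2.1 == k)).foldl
    (fun s t => PySem.Set.add s (pvNorm (t.1, t.2.2))) PySem.Set.empty

theorem pv_loopA (c : List Int) (d : PySem.Dict Int (List (Int × Int))) :
    (PySem.List.pyRange 1 ((c.length : Int) - 1)).foldl (fun d i =>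
        let ci := PySem.List.pyGetD c i 0
        if d.contains ci then
          let prev := PySem.List.pyGetD c (i - 1) 0
          let next := PySem.List.pyGetD c (i + 1) 0
          let lst := d.getD ci []
          if (prev, next) ∈ lst ∨ (next, prev) ∈ lst then d
          else d.insert ci (lst ++ [(prev, next)])
        else d) d
      = (pvTrip c).foldl pvStepA d := by
  rw [pvTrip, List.foldl_map]
  rfl

theorem pv_loopB (c : List Int) (d : PySem.Dict Int (PySem.Set (Int × Int))) :
    (PySem.List.pyRange 1 ((c.length : Int) - 1)).foldl (fun d i =>
        let a := PySem.List.pyGetD c (i - 1) 0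
        let b := PySem.List.pyGetD c (i + 1) 0
        let key := if a ≤ b then (a, b) else (b, a)
        d.modify (PySem.List.pyGetD c i 0) PySem.Set.empty (fun s => PySem.Set.add s key)) d
      = (pvTrip c).foldl pvStepB d := by
  rw [pvTrip, List.foldl_map]
  rfl

theorem pv_A_eq (graph : List (String × List (String × List Int))) :
    find_context graph
      = (pvKeyA graph).map (fun k => (k, ((pvValA graph k).length : Int))) := by
  simp only [find_context]
  rw [pv_nested_foldl (F := fun (st : PySem.Set Int × PySem.Set Int) c =>
        (c.foldl (fun s og => PySem.Set.add s og) st.1,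
         PySem.Set.add (PySem.Set.add st.2 (PySem.List.pyGetD c 0 0)) (PySem.List.pyGetD c (-1) 0)))]
  rw [PySem.List.foldl_prod_mk (f := fun s c => List.foldl (fun s og => PySem.Set.add s og) s c)
      (g := fun s c => PySem.Set.add (PySem.Set.add s (PySem.List.pyGetD c 0 0)) (PySem.List.pyGetD c (-1) 0))]
  rw [pv_nested_foldl (F := fun (d : PySem.Dict Int (List (Int × Int))) c =>
        (PySem.List.pyRange 1 ((c.length : Int) - 1)).foldl (fun d i =>
          let ci := PySem.List.pyGetD c i 0
          if d.contains ci then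
            let prev := PySem.List.pyGetD c (i - 1) 0
            let next := PySem.List.pyGetD c (i + 1) 0
            let lst := d.getD ci []
            if (prev, next) ∈ lst ∨ (next, prev) ∈ lst then d
            else d.insert ci (lst ++ [(prev, next)])
          else d) d)]
  simp only [pv_loopA]
  have hflat : ∀ d0 : PySem.Dict Int (List (Int × Int)),
      (pvContigs graph).foldl (fun d c => List.foldl pvStepA d (pvTrip c)) d0
        = (pvT graph).foldl pvStepA d0 := by
    intro d0; rw [pvT, List.flatMap_def, List.foldl_flatten, List.foldl_map]
  rw [hflat]
  have hK : ((List.foldl (fun s c => List.foldl (fun s og => PySem.Set.add s og) s c) PySem.Set.empty (pvContigs graph)).diff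
      (List.foldl (fun s c => PySem.Set.add (PySem.Set.add s (PySem.List.pyGetD c 0 0)) (PySem.List.pyGetD c (-1) 0))
        PySem.Set.empty (pvContigs graph))) = pvKeyA graph := rfl
  rw [hK]
  have hdiffeq : pvKeyA graph = (pvOgs graph).filter (fun x => !(PySem.Set.contains (pvE graph) x)) := by
    simp [pvKeyA, PySem.Set.diff, PySem.Set.contains]
  have hogs_ofList : pvOgs graph = PySem.Set.ofList (pvContigs graph).flatten := by
    rw [pvOgs, ← List.foldl_flatten]; rfl
  have hnodup : (pvKeyA graph).Nodup := by
    rw [hdiffeq, hogs_ofList]; exact (PySem.Set.nodup_ofList _).filter _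
  have hd0items : (List.foldl (fun d og => d.insert og []) (PySem.Dict.empty : PySem.Dict Int (List (Int × Int))) (pvKeyA graph)).items
      = (pvKeyA graph).map (fun og => (og, ([] : List (Int × Int)))) := by
    have h := PySem.Dict.items_foldl_insert_fresh (pvKeyA graph) (fun a => a)
      (fun _ => ([] : List (Int × Int))) PySem.Dict.empty (by intro a _; simp) (by simpa using hnodup)
    simpa using h
  have hd0keys : (List.foldl (fun d og => d.insert og []) (PySem.Dict.empty : PySem.Dict Int (List (Int × Int))) (pvKeyA graph)).keys = pvKeyA graph := by
    simp [PySem.Dict.keys, hd0items, Function.comp_def]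
  have hd0cont : ∀ k ∈ pvKeyA graph,
      (List.foldl (fun d og => d.insert og []) (PySem.Dict.empty : PySem.Dict Int (List (Int × Int))) (pvKeyA graph)).contains k = true := by
    intro k hk
    exact (PySem.Dict.contains_iff_mem_keys ..).mpr (by rw [hd0keys]; exact hk)
  have hd0getD : ∀ k ∈ pvKeyA graph,
      (List.foldl (fun d og => d.insert og []) (PySem.Dict.empty : PySem.Dict Int (List (Int × Int))) (pvKeyA graph)).getD k [] = [] := by
    intro k hk
    exact PySem.Dict.getD_of_mem_items
      (List.foldl (fun d og => d.insert og []) (PySem.Dict.empty : PySem.Dict Int (List (Int × Int))) (pvKeyA graph))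
      (by rw [hd0items]; exact List.mem_map_of_mem hk)
      (by rw [hd0keys]; exact hnodup) []
  have hkeysA : ((pvT graph).foldl pvStepA (List.foldl (fun d og => d.insert og []) (PySem.Dict.empty : PySem.Dict Int (List (Int × Int))) (pvKeyA graph))).keys = pvKeyA graph := by
    rw [pv_keysA, hd0keys]
  have hitems : ((pvT graph).foldl pvStepA (List.foldl (fun d og => d.insert og []) (PySem.Dict.empty : PySem.Dict Int (List (Int × Int))) (pvKeyA graph))).items
      = (pvKeyA graph).map (fun k => (k, ((pvT graph).foldl pvStepA (List.foldl (fun d og => d.insert og []) (PySem.Dict.empty : PySem.Dict Int (List (Int × Int))) (pvKeyA graph))).getD k [])) := by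
    have h := PySem.Dict.items_eq_map_keys ((pvT graph).foldl pvStepA (List.foldl (fun d og => d.insert og []) (PySem.Dict.empty : PySem.Dict Int (List (Int × Int))) (pvKeyA graph))) (by rw [hkeysA]; exact hnodup) ([] : List (Int × Int))
    rwa [hkeysA] at h
  rw [hitems, List.map_map]
  apply List.map_congr_left
  intro k hk
  have hv : ((pvT graph).foldl pvStepA (List.foldl (fun d og => d.insert og []) (PySem.Dict.empty : PySem.Dict Int (List (Int × Int))) (pvKeyA graph))).getD k [] = pvValA graph k := by
    rw [pv_getA _ _ _ (hd0cont k hk), hd0getD k hk]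
    rfl
  simp [hv]

theorem pv_prodB (cs : List (List Int)) (a : PySem.Set Int) (b : PySem.Dict Int (PySem.Set (Int × Int))) :
    cs.foldl (fun st c =>
        (PySem.Set.add (PySem.Set.add st.1 (PySem.List.pyGetD c 0 0)) (PySem.List.pyGetD c (-1) 0),
         (PySem.List.pyRange 1 ((c.length : Int) - 1)).foldl (fun d i =>
            let a := PySem.List.pyGetD c (i - 1) 0
            let b := PySem.List.pyGetD c (i + 1) 0
            let key := if a ≤ b then (a, b) else (b, a)
            d.modify (PySem.List.pyGetD c i 0) PySem.Set.empty (fun s => PySem.Set.add s key)) st.2)) (a, b)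
      = (cs.foldl (fun s c =>
           PySem.Set.add (PySem.Set.add s (PySem.List.pyGetD c 0 0)) (PySem.List.pyGetD c (-1) 0)) a,
         cs.foldl (fun d c => (PySem.List.pyRange 1 ((c.length : Int) - 1)).foldl (fun d i =>
            let a := PySem.List.pyGetD c (i - 1) 0
            let b := PySem.List.pyGetD c (i + 1) 0
            let key := if a ≤ b then (a, b) else (b, a)
            d.modify (PySem.List.pyGetD c i 0) PySem.Set.empty (fun s => PySem.Set.add s key)) d) b) := by
  induction cs generalizing a b with
  | nil => rfl
  | cons c t ih => simp only [List.foldl_cons]; exact ih _ _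

theorem pv_B_eq (graph : List (String × List (String × List Int))) :
    find_context_alt graph
      = (pvKeyB graph).map (fun k => (k, PySem.Set.len (pvValB graph k))) := by
  simp only [find_context_alt]
  rw [pv_nested_foldl (F := fun (st : PySem.Set Int × PySem.Dict Int (PySem.Set (Int × Int))) c =>
        (PySem.Set.add (PySem.Set.add st.1 (PySem.List.pyGetD c 0 0)) (PySem.List.pyGetD c (-1) 0),
         (PySem.List.pyRange 1 ((c.length : Int) - 1)).foldl (fun d i =>
            let a := PySem.List.pyGetD c (i - 1) 0
            let b := PySem.List.pyGetD c (i + 1) 0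
            let key := if a ≤ b then (a, b) else (b, a)
            d.modify (PySem.List.pyGetD c i 0) PySem.Set.empty (fun s => PySem.Set.add s key)) st.2))]
  rw [pv_prodB]
  simp only [pv_loopB]
  have hflat : ∀ d0 : PySem.Dict Int (PySem.Set (Int × Int)),
      (pvContigs graph).foldl (fun d c => List.foldl pvStepB d (pvTrip c)) d0
        = (pvT graph).foldl pvStepB d0 := by
    intro d0; rw [pvT, List.flatMap_def, List.foldl_flatten, List.foldl_map]
  rw [hflat]
  have hkeysB : ((pvT graph).foldl pvStepB (PySem.Dict.empty : PySem.Dict Int (PySem.Set (Int × Int)))).keys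
      = PySem.Set.ofList ((pvT graph).map (fun t => t.2.1)) := by
    have h := PySem.Dict.keys_foldl_modify_key (pvT graph) (fun t => t.2.1) PySem.Set.empty
      (fun _ t => fun s => PySem.Set.add s (pvNorm (t.1, t.2.2)))
      (PySem.Dict.empty : PySem.Dict Int (PySem.Set (Int × Int)))
    simpa [pvStepB] using h
  have hnodupB : ((pvT graph).foldl pvStepB (PySem.Dict.empty : PySem.Dict Int (PySem.Set (Int × Int)))).keys.Nodup := by
    rw [hkeysB]; exact PySem.Set.nodup_ofList _
  have hitemsB : ((pvT graph).foldl pvStepB (PySem.Dict.empty : PySem.Dict Int (PySem.Set (Int × Int)))).items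
      = (PySem.Set.ofList ((pvT graph).map (fun t => t.2.1))).map (fun k => (k, pvValB graph k)) := by
    have h := PySem.Dict.items_eq_map_keys
      ((pvT graph).foldl pvStepB (PySem.Dict.empty : PySem.Dict Int (PySem.Set (Int × Int))))
      hnodupB PySem.Set.empty
    rw [hkeysB] at h
    rw [h]
    apply List.map_congr_left
    intro k _
    have hg := pv_getB (pvT graph) (PySem.Dict.empty : PySem.Dict Int (PySem.Set (Int × Int))) k
    rw [hg]
    rfl
  rw [hitemsB, List.filter_map, List.map_map]
  have hpred : ((fun p : Int × PySem.Set (Int × Int) => !(PySem.Set.contains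
        (List.foldl (fun s c => PySem.Set.add (PySem.Set.add s (PySem.List.pyGetD c 0 0)) (PySem.List.pyGetD c (-1) 0)) PySem.Set.empty (pvContigs graph)) p.1))
      ∘ (fun k => (k, pvValB graph k))) = (fun x => !(PySem.Set.contains (pvE graph) x)) := by
    funext x
    rfl
  rw [hpred]
  rfl

theorem pv_val_eq (graph : List (String × List (String × List Int))) (k : Int) :
    ((pvValA graph k).length : Int) = PySem.Set.len (pvValB graph k) := by
  simp only [pvValA, pvValB, PySem.Set.len]
  have h := pv_count (((pvT graph).filter (fun t => t.2.1 == k)).map (fun t => (t.1, t.2.2)))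
    [] PySem.Set.empty (by intro q; simp [PySem.Set.empty]) rfl
  rw [List.foldl_map, List.foldl_map] at h
  exact_mod_cast h

theorem pv_flat_filter (p : Int → Bool) :
    ∀ (cs : List (List Int)), (∀ c ∈ cs, c.filter p = ((pvTrip c).map (fun t => t.2.1)).filter p) →
    cs.flatten.filter p = ((cs.flatMap pvTrip).map (fun t => t.2.1)).filter p := by
  intro cs
  induction cs with
  | nil => intro _; rfl
  | cons c t ih =>
    intro h
    simp only [List.flatten_cons, List.flatMap_cons, List.map_append, List.filter_append]
    rw [h c (by simp), ih (fun c hc => h c (by simp [hc]))]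

theorem pv_keys_eq (graph : List (String × List (String × List Int)))
    (hne : ∀ c ∈ pvContigs graph, c ≠ []) : pvKeyA graph = pvKeyB graph := by
  have hdiffeq : pvKeyA graph = (pvOgs graph).filter (fun x => !(PySem.Set.contains (pvE graph) x)) := by
    simp [pvKeyA, PySem.Set.diff, PySem.Set.contains]
  have hogs_ofList : pvOgs graph = PySem.Set.ofList (pvContigs graph).flatten := by
    rw [pvOgs, ← List.foldl_flatten]; rfl
  have hcomm : ∀ (l : List Int),
      (PySem.Set.ofList l).filter (fun x => !(PySem.Set.contains (pvE graph) x))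
        = PySem.Set.ofList (l.filter (fun x => !(PySem.Set.contains (pvE graph) x))) := by
    intro l
    have h := pv_foldl_add_filter (fun x => !(PySem.Set.contains (pvE graph) x)) l []
    simpa [PySem.Set.ofList_eq_foldl] using h
  rw [hdiffeq, hogs_ofList, pvKeyB, pvT, hcomm, hcomm]
  congr 1
  apply pv_flat_filter
  intro c hc
  have hcne := hne c hc
  have hmem := pv_edge_mem (pvContigs graph) PySem.Set.empty c hc
  have h1 : (!(PySem.Set.contains (pvE graph) (PySem.List.pyGetD c 0 0))) = false := by
    simp [PySem.Set.contains, pvE]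
    exact hmem.1
  have h2 : (!(PySem.Set.contains (pvE graph) (PySem.List.pyGetD c (-1) 0))) = false := by
    simp [PySem.Set.contains, pvE]
    exact hmem.2
  rw [pv_mids c hcne]
  exact pv_filter_contig _ c hcne h1 h2

-- ===== VERDICT (by name: the statement is the Claim_ definition above) =====
theorem find_context_spec : Claim_equal_find_context := by
  intro graph _ hP
  unfold Spec_find_context
  have hne : ∀ c ∈ pvContigs graph, c ≠ [] := by
    intro c hc
    rw [pvContigs] at hc
    simp only [List.mem_flatMap, List.mem_map] at hc
    obtain ⟨nv, hnv, q, hq, rfl⟩ := hc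
    exact hP nv hnv q hq
  rw [pv_A_eq, pv_B_eq, ← pv_keys_eq graph hne]
  apply List.map_congr_left
  intro k _
  rw [pv_val_eq]
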